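-- pv_equiv track=rewrite | github.com/sudhanlee/Password_Generator | Project/passwordgenerator.py | make_leet
-- ===== SOURCE A (Python) =====
-- def make_leet(x):
--     """convert string to leet"""
--     l=[
--        ['a', '4'],
--        ['i', '1'],
--        ['e', '3'],
--        ['t', '7'],
--        ['o', '0'],
--        ['s', '5'],
--        ['g', '9'],
--        ['z', '2']
--       ]
--     for letter in l:
--         x = x.replace(letter[0],letter[1])
--     return x
-- ===== SOURCE B (Python) =====
-- def make_leet(x):
--     """convert string to leet"""
--     d = {'a': '4', 'i': '1', 'e': '3', 't': '7', 'o': '0', 's': '5', 'g': '9', 'z': '2'}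
--     return ''.join(d.get(c, c) for c in x)
-- ===== Notes on version B (the rewrite author's own statement) =====
-- stated objective: idiomatic
-- what changed: Replaces A's eight sequential whole-string str.replace passes by one pass over the characters with a substitution-dict lookup per character.
import Mathlib
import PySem

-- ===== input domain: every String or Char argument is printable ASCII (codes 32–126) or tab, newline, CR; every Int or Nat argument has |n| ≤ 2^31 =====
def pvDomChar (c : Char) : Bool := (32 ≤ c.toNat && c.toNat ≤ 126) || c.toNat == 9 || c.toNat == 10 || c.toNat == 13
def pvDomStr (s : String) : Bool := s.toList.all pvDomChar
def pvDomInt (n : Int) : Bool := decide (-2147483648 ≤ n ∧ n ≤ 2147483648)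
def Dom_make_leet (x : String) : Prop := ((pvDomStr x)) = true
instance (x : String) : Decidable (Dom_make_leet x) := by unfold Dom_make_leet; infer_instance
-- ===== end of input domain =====

-- B replaces A's eight whole-string replace passes by one pass over the characters with a dict lookup (idiomatic).

-- ===== PORT A =====
def make_leet (x : String) : String :=
  let l : List (String × String) :=
    [("a", "4"), ("i", "1"), ("e", "3"), ("t", "7"),
     ("o", "0"), ("s", "5"), ("g", "9"), ("z", "2")]
  l.foldl (fun x letter => PySem.Str.replace x letter.1 letter.2) x

-- ===== PORT B =====
def leetDict : PySem.Dict Char Char :=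
  PySem.Dict.ofList
    [('a', '4'), ('i', '1'), ('e', '3'), ('t', '7'),
     ('o', '0'), ('s', '5'), ('g', '9'), ('z', '2')]

def make_leet_alt (x : String) : String :=
  String.ofList (x.toList.map (fun c => leetDict.getD c c))

-- ===== PRECONDITION & SPEC =====
def Spec_make_leet (x : String) (out : String) : Prop := out = make_leet_alt x
instance (x : String) (out : String) : Decidable (Spec_make_leet x out) := by unfold Spec_make_leet; infer_instance

-- ===== CLAIM (what is proved, stated in full; the proofs are below) =====
def Claim_equal_make_leet : Prop := ∀ (x : String), Dom_make_leet x → Spec_make_leet x (make_leet x)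

-- ===== LEMMAS AND PROOFS =====

-- one single-character substitution, as replace performs it on each character
def subst1 (a b c : Char) : Char := if c = a then b else c

-- replacing one single character by one single character is a per-character map
theorem replace_go_single (a b : Char) :
    ∀ (fuel : Nat) (l acc : List Char), l.length ≤ fuel →
      PySem.Chars.replace.go [a] [b] fuel l acc
        = acc.reverse ++ l.map (subst1 a b) := by
  intro fuel
  induction fuel with
  | zero =>
    intro l acc h
    cases l with
    | nil => simp [PySem.Chars.replace.go]
    | cons c t => simp at h
  | succ n ih =>
    intro l acc h
    cases l with
    | nil => simp [PySem.Chars.replace.go]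
    | cons c t =>
      simp only [PySem.Chars.replace.go]
      by_cases hc : c = a
      · subst hc
        have hp : List.isPrefixOf [c] (c :: t) = true := by
          simp [List.isPrefixOf]
        simp only [hp, if_true]
        rw [show List.drop [c].length (c :: t) = t from rfl,
            ih t _ (by simpa using h)]
        simp [subst1]
      · have hp : List.isPrefixOf [a] (c :: t) = false := by
          simp [List.isPrefixOf]
          intro h'; exact absurd h'.symm hc
        simp only [hp]
        rw [if_neg (by simp), ih t _ (by simpa using h)]
        simp [subst1, hc]

theorem replace_single (a b : Char) (l : List Char) :
    PySem.Chars.replace l [a] [b] = l.map (subst1 a b) := by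
  simp only [PySem.Chars.replace, List.isEmpty]
  rw [replace_go_single a b l.length l [] le_rfl]
  simp

theorem str_replace_single (s : String) (a b : Char) :
    (PySem.Str.replace s (String.ofList [a]) (String.ofList [b])).toList
      = s.toList.map (subst1 a b) := by
  rw [PySem.Str.toList_replace]
  have h1 : (String.ofList [a]).toList = [a] := by simp
  have h2 : (String.ofList [b]).toList = [b] := by simp
  rw [h1, h2, replace_single]

-- the eight disjoint, non-cascading substitutions collapse to the dict lookup
theorem subst_point (c : Char) :
    subst1 'z' '2' (subst1 'g' '9' (subst1 's' '5' (subst1 'o' '0'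
      (subst1 't' '7' (subst1 'e' '3' (subst1 'i' '1' (subst1 'a' '4' c)))))))
      = leetDict.getD c c := by
  by_cases h1 : c = 'a'; · subst h1; decide
  by_cases h2 : c = 'i'; · subst h2; decide
  by_cases h3 : c = 'e'; · subst h3; decide
  by_cases h4 : c = 't'; · subst h4; decide
  by_cases h5 : c = 'o'; · subst h5; decide
  by_cases h6 : c = 's'; · subst h6; decide
  by_cases h7 : c = 'g'; · subst h7; decide
  by_cases h8 : c = 'z'; · subst h8; decide
  have hd : leetDict = PySem.Dict.mk
      [('a', '4'), ('i', '1'), ('e', '3'), ('t', '7'),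
       ('o', '0'), ('s', '5'), ('g', '9'), ('z', '2')] := by rfl
  rw [hd]
  simp [subst1, PySem.Dict.getD, PySem.Dict.get?,
        h1, h2, h3, h4, h5, h6, h7, h8,
        Ne.symm h1, Ne.symm h2, Ne.symm h3, Ne.symm h4,
        Ne.symm h5, Ne.symm h6, Ne.symm h7, Ne.symm h8]

-- ===== VERDICT (by name: the statement is the Claim_ definition above) =====
theorem make_leet_spec : Claim_equal_make_leet := by
  intro x _
  unfold Spec_make_leet make_leet make_leet_alt
  simp only [List.foldl]
  apply String.toList_inj.mp
  rw [show ("a" : String) = String.ofList ['a'] from rfl]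
  rw [show ("4" : String) = String.ofList ['4'] from rfl]
  rw [show ("i" : String) = String.ofList ['i'] from rfl]
  rw [show ("1" : String) = String.ofList ['1'] from rfl]
  rw [show ("e" : String) = String.ofList ['e'] from rfl]
  rw [show ("3" : String) = String.ofList ['3'] from rfl]
  rw [show ("t" : String) = String.ofList ['t'] from rfl]
  rw [show ("7" : String) = String.ofList ['7'] from rfl]
  rw [show ("o" : String) = String.ofList ['o'] from rfl]
  rw [show ("0" : String) = String.ofList ['0'] from rfl]
  rw [show ("s" : String) = String.ofList ['s'] from rfl]
  rw [show ("5" : String) = String.ofList ['5'] from rfl]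
  rw [show ("g" : String) = String.ofList ['g'] from rfl]
  rw [show ("9" : String) = String.ofList ['9'] from rfl]
  rw [show ("z" : String) = String.ofList ['z'] from rfl]
  rw [show ("2" : String) = String.ofList ['2'] from rfl]
  rw [str_replace_single _ 'z' '2']
  rw [str_replace_single _ 'g' '9']
  rw [str_replace_single _ 's' '5']
  rw [str_replace_single _ 'o' '0']
  rw [str_replace_single _ 't' '7']
  rw [str_replace_single _ 'e' '3']
  rw [str_replace_single _ 'i' '1']
  rw [str_replace_single x 'a' '4']
  simp only [String.toList_ofList]
  generalize x.toList = cs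
  induction cs with
  | nil => simp
  | cons c t ih =>
    simp only [List.map_cons]
    rw [ih, subst_point c]
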